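-- pv_equiv track=rewrite | github.com/hojoungjang/programming-exercises | 전구와-스위치/solution.py | solution
-- ===== SOURCE A (Python) =====
-- def solution(start, end, count=0):
--     state = [bulb for bulb in start] + ["0"]
--
--     for i in range(1, len(start)):
--         if state[i-1] == end[i-1]:
--             continue
--
--         state[i-1] = "0" if state[i-1] == "1" else "1"
--         state[i] = "0" if state[i] == "1" else "1"
--         state[i+1] = "0" if state[i+1] == "1" else "1"
--         count += 1
--
--     if "".join(state[:-1]) == end:
--         return count
--     return -1
-- ===== SOURCE B (Python) =====
-- def solution(start, end, count=0):
--     # Sliding press-parity window instead of mutating a full state list: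
--     # record one press bit per step, then reconstruct every bulb from press parity.
--     n = len(start)
--     presses = []
--     p2 = p1 = 0  # press bits at steps i-2 and i-1
--     for i in range(1, n):
--         k = p2 + p1
--         c = start[i - 1]
--         e = c if k == 0 else ("1" if (k + (c == "1")) % 2 == 1 else "0")
--         if e != end[i - 1]:
--             bit = 1
--             count += 1
--         else:
--             bit = 0
--         presses.append(bit)
--         p2, p1 = p1, bit
--     final = []
--     for j in range(n):
--         k = 0
--         for u in (j - 1, j, j + 1):
--             if 1 <= u <= n - 1:
--                 k += presses[u - 1]
--         c = start[j]
--         final.append(c if k == 0 else ("1" if (k + (c == "1")) % 2 == 1 else "0"))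
--     return count if "".join(final) == end else -1
-- ===== Notes on version B (the rewrite author's own statement) =====
-- stated objective: alternative
-- what changed: Instead of mutating a full bulb-state list with three flips per press, B records one press bit per step using a two-bit sliding parity window and reconstructs every bulb's final state from the press-bit parities.
import Mathlib
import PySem

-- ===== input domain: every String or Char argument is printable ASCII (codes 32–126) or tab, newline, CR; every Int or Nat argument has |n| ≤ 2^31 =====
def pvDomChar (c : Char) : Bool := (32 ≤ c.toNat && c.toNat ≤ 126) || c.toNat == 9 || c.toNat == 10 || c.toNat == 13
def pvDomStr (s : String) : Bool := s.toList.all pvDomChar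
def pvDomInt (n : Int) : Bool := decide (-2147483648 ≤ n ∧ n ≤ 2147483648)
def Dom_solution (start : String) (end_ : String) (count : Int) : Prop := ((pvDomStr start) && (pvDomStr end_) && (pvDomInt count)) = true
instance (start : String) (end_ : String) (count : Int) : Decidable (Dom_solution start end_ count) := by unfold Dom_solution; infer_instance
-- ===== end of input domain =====

-- B replaces A's in-place flipping of a mutable bulb-state list by a sliding press-parity
-- window plus a final per-bulb reconstruction from the recorded press bits (objective: alternative).

-- ===== PORT A =====
-- '"0" if c == "1" else "1"'
def pyFlip (c : Char) : Char := if c == '1' then '0' else '1'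

-- one iteration of A's for-loop; acc = (state, count).  Indices into state are always in
-- range; the pyGetD read of end_ is exact under Pre_solution (which excludes the
-- IndexError inputs), where the index is in range.
def stepA (e : List Char) (acc : List Char × Int) (i : Int) : List Char × Int :=
  if PySem.List.pyGetD acc.1 (i - 1) ' ' == PySem.List.pyGetD e (i - 1) ' ' then acc
  else
    let st1 := PySem.List.pySetD acc.1 (i - 1) (pyFlip (PySem.List.pyGetD acc.1 (i - 1) ' '))
    let st2 := PySem.List.pySetD st1 i (pyFlip (PySem.List.pyGetD st1 i ' '))
    let st3 := PySem.List.pySetD st2 (i + 1) (pyFlip (PySem.List.pyGetD st2 (i + 1) ' '))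
    (st3, acc.2 + 1)

def solution (start : String) (end_ : String) (count : Int) : Int :=
  let s := start.toList
  let e := end_.toList
  let r := (PySem.List.pyRange 1 (PySem.List.len s) 1).foldl (stepA e) (s ++ ['0'], count)
  if PySem.List.slice r.1 none (some (-1)) == e then r.2 else -1

-- ===== PORT B =====
-- 'c if k == 0 else ("1" if (k + (c == "1")) % 2 == 1 else "0")'
def effChar (c : Char) (k : Nat) : Char :=
  if k == 0 then c
  else if (k + (if c == '1' then 1 else 0)) % 2 == 1 then '1' else '0'

-- one iteration of B's loop; acc = (presses, p2, p1, count)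
def stepB (s e : List Char) (acc : List Nat × Nat × Nat × Int) (i : Int) :
    List Nat × Nat × Nat × Int :=
  let k := acc.2.1 + acc.2.2.1
  let ec := effChar (PySem.List.pyGetD s (i - 1) ' ') k
  if ec != PySem.List.pyGetD e (i - 1) ' ' then (acc.1 ++ [1], acc.2.2.1, 1, acc.2.2.2 + 1)
  else (acc.1 ++ [0], acc.2.2.1, 0, acc.2.2.2)

-- B's reconstruction of the flip count of bulb j: press bits at steps j-1, j, j+1 within [1, n-1]
def bulbK (ps : List Nat) (n : Nat) (j : Int) : Nat :=
  ([j - 1, j, j + 1] : List Int).foldl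
    (fun acc u => if 1 ≤ u ∧ u ≤ (n : Int) - 1 then acc + PySem.List.pyGetD ps (u - 1) 0 else acc) 0

def solution_alt (start : String) (end_ : String) (count : Int) : Int :=
  let s := start.toList
  let e := end_.toList
  let n := s.length
  let r := (PySem.List.pyRange 1 (n : Int) 1).foldl (stepB s e) ([], 0, 0, count)
  let final := (List.range n).map
    (fun (j : Nat) => effChar (PySem.List.pyGetD s (j : Int) ' ') (bulbK r.1 n (j : Int)))
  if final == e then r.2.2.2 else -1

-- ===== PRECONDITION & SPEC =====
-- Pre_ excludes exactly the inputs where the Python A raises IndexError (end shorter than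
-- len(start)-1, read as end[i-1] inside the loop); the Python B raises there as well.
def Pre_solution (start : String) (end_ : String) (count : Int) : Prop :=
  start.toList.length ≤ end_.toList.length + 1
instance (start : String) (end_ : String) (count : Int) : Decidable (Pre_solution start end_ count) := by
  unfold Pre_solution; infer_instance

def pvWitness_solution : String × String × Int := ("0110", "1010", 0)

def Spec_solution (start : String) (end_ : String) (count : Int) (out : Int) : Prop := out = solution_alt start end_ count
instance (start : String) (end_ : String) (count : Int) (out : Int) : Decidable (Spec_solution start end_ count out) := by unfold Spec_solution; infer_instance

-- ===== CLAIM (what is proved, stated in full; the proofs are below) =====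
def Claim_equal_solution : Prop := ∀ (start : String) (end_ : String) (count : Int), Dom_solution start end_ count → Pre_solution start end_ count → Spec_solution start end_ count (solution start end_ count)

-- ===== LEMMAS AND PROOFS =====

theorem getD_set_eq {α : Type} (l : List α) (i j : Nat) (v d : α) :
    (l.set i v).getD j d = if i = j ∧ j < l.length then v else l.getD j d := by
  simp only [List.getD_eq_getElem?_getD, List.getElem?_set]
  split_ifs with h1 h2 h3 h4 <;> simp_all

theorem getD_snoc {α : Type} (l : List α) (b d : α) (i : Nat) :
    (l ++ [b]).getD i d = if i < l.length then l.getD i d else if i = l.length then b else d := by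
  rcases Nat.lt_trichotomy i l.length with h | h | h
  · simp [List.getD_eq_getElem?_getD, List.getElem?_append_left h, if_pos h]
  · subst h; simp [List.getD_eq_getElem?_getD]
  · rw [if_neg (by omega), if_neg (by omega)]
    simp only [List.getD_eq_getElem?_getD, List.getElem?_append_right (by omega : l.length ≤ i)]
    rw [List.getElem?_eq_none (by simp; omega)]
    rfl

theorem pyGetD_toNat {α : Type} (xs : List α) (i : Int) (d : α) (h : 0 ≤ i) :
    PySem.List.pyGetD xs i d = xs.getD i.toNat d := by
  rw [← Int.toNat_of_nonneg h, PySem.List.pyGetD_natCast]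
  simp [Int.toNat_of_nonneg h]

theorem effChar_flip (c : Char) (k : Nat) : pyFlip (effChar c k) = effChar c (k + 1) := by
  unfold pyFlip effChar
  by_cases hc : (c == '1') = true <;>
    simp only [hc, if_true] <;>
    split_ifs <;> simp_all <;> omega

theorem bulbK_eval (ps : List Nat) (n : Nat) (j : Int) :
    bulbK ps n j =
      (if 1 ≤ j - 1 ∧ j - 1 ≤ (n : Int) - 1 then ps.getD (j - 2).toNat 0 else 0) +
      (if 1 ≤ j ∧ j ≤ (n : Int) - 1 then ps.getD (j - 1).toNat 0 else 0) +
      (if 1 ≤ j + 1 ∧ j + 1 ≤ (n : Int) - 1 then ps.getD j.toNat 0 else 0) := by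
  unfold bulbK
  simp only [List.foldl, show j - 1 - 1 = j - 2 by ring, show j + 1 - 1 = j by ring]
  split_ifs with h1 h2 h3 <;>
    (try rw [pyGetD_toNat _ _ _ (by omega)]) <;>
    (try rw [pyGetD_toNat _ _ _ (by omega)]) <;>
    (try rw [pyGetD_toNat _ _ _ (by omega)]) <;>
    ring

theorem bulbK_nil (n : Nat) (j : Int) : bulbK [] n j = 0 := by
  rw [bulbK_eval]; split_ifs <;> simp

theorem bulbK_zero (ps : List Nat) (n : Nat) (j : Nat) (h : ps.length + 2 ≤ j) :
    bulbK ps n (j : Int) = 0 := by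
  rw [bulbK_eval]
  rw [List.getD_eq_default _ _ (by omega), List.getD_eq_default _ _ (by omega),
      List.getD_eq_default _ _ (by omega)]
  split_ifs <;> simp

theorem bulbK_snoc (ps : List Nat) (n : Nat) (b : Nat) (j : Nat) (hn : ps.length + 2 ≤ n) :
    bulbK (ps ++ [b]) n (j : Int) =
      bulbK ps n (j : Int) + (if j ≤ ps.length + 2 ∧ ps.length ≤ j then b else 0) := by
  rw [bulbK_eval, bulbK_eval]
  rw [getD_snoc, getD_snoc, getD_snoc]
  rcases Nat.lt_or_ge ((j : Int) - 2).toNat ps.length with a1 | a1 <;>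
  rcases Nat.lt_or_ge ((j : Int) - 1).toNat ps.length with a2 | a2 <;>
  rcases Nat.lt_or_ge ((j : Int)).toNat ps.length with a3 | a3 <;>
    (try rw [List.getD_eq_default _ _ a1]) <;>
    (try rw [List.getD_eq_default _ _ a2]) <;>
    (try rw [List.getD_eq_default _ _ a3]) <;>
    split_ifs <;> omega

def stModel (s : List Char) (ps : List Nat) : List Char :=
  (List.range (s.length + 1)).map
    (fun j => effChar ((s ++ ['0']).getD j ' ') (bulbK ps s.length (j : Int)))

theorem length_stModel (s : List Char) (ps : List Nat) : (stModel s ps).length = s.length + 1 := by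
  simp [stModel]

theorem getD_stModel (s : List Char) (ps : List Nat) (j : Nat) (h : j < s.length + 1) :
    (stModel s ps).getD j ' ' = effChar ((s ++ ['0']).getD j ' ') (bulbK ps s.length (j : Int)) := by
  unfold stModel
  rw [List.getD_eq_getElem _ _ (by simpa using h)]
  simp

theorem stModel_nil (s : List Char) : stModel s [] = s ++ ['0'] := by
  apply List.ext_getElem (by simp [length_stModel])
  intro j h1 h2
  simp [stModel, bulbK_nil, effChar, List.getElem?_eq_getElem h2]

theorem stModel_nopress (s : List Char) (ps : List Nat) (h : ps.length + 2 ≤ s.length) :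
    stModel s (ps ++ [0]) = stModel s ps := by
  unfold stModel
  apply List.map_congr_left
  intro j hj
  rw [bulbK_snoc _ _ _ _ h]
  split_ifs <;> simp

theorem stModel_press (s : List Char) (ps : List Nat) (h : ps.length + 2 ≤ s.length) :
    (((stModel s ps).set ps.length (pyFlip ((stModel s ps).getD ps.length ' '))).set
        (ps.length + 1)
        (pyFlip (((stModel s ps).set ps.length
          (pyFlip ((stModel s ps).getD ps.length ' '))).getD (ps.length + 1) ' '))).set
      (ps.length + 2)
      (pyFlip ((((stModel s ps).set ps.length (pyFlip ((stModel s ps).getD ps.length ' '))).set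
          (ps.length + 1)
          (pyFlip (((stModel s ps).set ps.length
            (pyFlip ((stModel s ps).getD ps.length ' '))).getD (ps.length + 1) ' '))).getD
        (ps.length + 2) ' '))
    = stModel s (ps ++ [1]) := by
  have hlm : (stModel s ps).length = s.length + 1 := length_stModel s ps
  have r2 : ((stModel s ps).set ps.length (pyFlip ((stModel s ps).getD ps.length ' '))).getD
      (ps.length + 1) ' ' = (stModel s ps).getD (ps.length + 1) ' ' := by
    rw [getD_set_eq]; rw [if_neg (by omega)]
  rw [r2]
  have r3 : (((stModel s ps).set ps.length (pyFlip ((stModel s ps).getD ps.length ' '))).set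
      (ps.length + 1) (pyFlip ((stModel s ps).getD (ps.length + 1) ' '))).getD
      (ps.length + 2) ' ' = (stModel s ps).getD (ps.length + 2) ' ' := by
    rw [getD_set_eq]
    rw [if_neg (by omega)]
    rw [getD_set_eq]
    rw [if_neg (by omega)]
  rw [r3]
  apply List.ext_getElem (by simp [List.length_set, length_stModel])
  intro j hj1 hj2
  have hjn : j < s.length + 1 := by simpa [length_stModel] using hj2
  rw [← List.getD_eq_getElem _ ' ' hj1, ← List.getD_eq_getElem _ ' ' hj2]
  rw [getD_set_eq, getD_set_eq, getD_set_eq]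
  simp only [List.length_set, hlm]
  rw [getD_stModel s (ps ++ [1]) j hjn]
  have hwin := bulbK_snoc ps s.length 1 j (by omega)
  rcases Nat.lt_trichotomy j ps.length with hj | hj | hj
  · rw [if_neg (by omega), if_neg (by omega), if_neg (by omega)]
    rw [getD_stModel s ps j hjn, hwin]
    rw [if_neg (by omega), add_zero]
  · rw [if_neg (by omega), if_neg (by omega), if_pos (by omega)]
    rw [getD_stModel s ps ps.length (by omega), hwin, if_pos (by omega), ← hj, effChar_flip]
  · rcases Nat.lt_trichotomy j (ps.length + 1) with hj2 | hj2 | hj2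
    · omega
    · rw [if_neg (by omega), if_pos (by omega)]
      rw [getD_stModel s ps (ps.length + 1) (by omega), hwin, if_pos (by omega), ← hj2, effChar_flip]
    · rcases Nat.lt_trichotomy j (ps.length + 2) with hj3 | hj3 | hj3
      · omega
      · rw [if_pos (by omega)]
        rw [getD_stModel s ps (ps.length + 2) (by omega), hwin, if_pos (by omega), ← hj3, effChar_flip]
      · rw [if_neg (by omega), if_neg (by omega), if_neg (by omega)]
        rw [getD_stModel s ps j hjn, hwin, if_neg (by omega), add_zero]

theorem loop_inv (s e : List Char) (c0 : Int) (t : Nat) (ht : t + 1 ≤ s.length) :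
    ((PySem.List.pyRange 1 (1 + (t : Int)) 1).foldl (stepB s e) ([], 0, 0, c0)).1.length = t ∧
    ((PySem.List.pyRange 1 (1 + (t : Int)) 1).foldl (stepA e) (s ++ ['0'], c0)).1 =
      stModel s ((PySem.List.pyRange 1 (1 + (t : Int)) 1).foldl (stepB s e) ([], 0, 0, c0)).1 ∧
    ((PySem.List.pyRange 1 (1 + (t : Int)) 1).foldl (stepA e) (s ++ ['0'], c0)).2 =
      ((PySem.List.pyRange 1 (1 + (t : Int)) 1).foldl (stepB s e) ([], 0, 0, c0)).2.2.2 ∧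
    bulbK ((PySem.List.pyRange 1 (1 + (t : Int)) 1).foldl (stepB s e) ([], 0, 0, c0)).1 s.length (t : Int) =
      ((PySem.List.pyRange 1 (1 + (t : Int)) 1).foldl (stepB s e) ([], 0, 0, c0)).2.1 +
      ((PySem.List.pyRange 1 (1 + (t : Int)) 1).foldl (stepB s e) ([], 0, 0, c0)).2.2.1 ∧
    bulbK ((PySem.List.pyRange 1 (1 + (t : Int)) 1).foldl (stepB s e) ([], 0, 0, c0)).1 s.length ((t : Int) + 1) =
      ((PySem.List.pyRange 1 (1 + (t : Int)) 1).foldl (stepB s e) ([], 0, 0, c0)).2.2.1 := by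
  induction t with
  | zero =>
    rw [show (1 + ((0:Nat) : Int)) = 1 by norm_num, PySem.List.pyRange_one_eq_nil (by omega : (1:Int) ≤ 1)]
    simp [stModel_nil, bulbK_nil]
  | succ t IH =>
    obtain ⟨hlen, hst, hcnt, h4a, h4b⟩ := IH (by omega)
    rw [show ((1:Int) + ((t+1:Nat) : Int)) = (1 + (t : Int)) + 1 by push_cast; ring]
    rw [PySem.List.pyRange_one_succ_right (by omega : (1:Int) ≤ 1 + (t:Int))]
    simp only [List.foldl_append, List.foldl_cons, List.foldl_nil]
    set A0 := ((PySem.List.pyRange 1 (1 + (t : Int)) 1).foldl (stepA e) (s ++ ['0'], c0)) with hA0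
    set B0 := ((PySem.List.pyRange 1 (1 + (t : Int)) 1).foldl (stepB s e) ([], 0, 0, c0)) with hB0
    rw [show ((1:Int) + (t:Nat)) = ((t+1:Nat):Int) by push_cast; ring]
    have hsub : (((t+1:Nat)):Int) - 1 = ((t:Nat):Int) := by push_cast; ring
    have hsplit : (s ++ ['0']).getD t ' ' = s.getD t ' ' := by
      rw [getD_snoc]; rw [if_pos (show t < s.length by omega)]
    have hcondA : PySem.List.pyGetD A0.1 (((t:Nat)):Int) ' ' =
        effChar (s.getD t ' ') (B0.2.1 + B0.2.2.1) := by
      rw [hst, PySem.List.pyGetD_natCast, getD_stModel s B0.1 t (by omega), h4a, hsplit]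
    have hlen2 : B0.1.length + 2 ≤ s.length := by omega
    by_cases hc : effChar (s.getD t ' ') (B0.2.1 + B0.2.2.1) = PySem.List.pyGetD e ((t:Nat):Int) ' '
    · -- no press
      have hA : stepA e A0 (((t+1:Nat)):Int) = A0 := by
        unfold stepA
        rw [hsub]
        rw [if_pos (by rw [hcondA]; simpa using hc)]
      have hB : stepB s e B0 (((t+1:Nat)):Int) = (B0.1 ++ [0], B0.2.2.1, 0, B0.2.2.2) := by
        unfold stepB
        rw [hsub, PySem.List.pyGetD_natCast s]
        rw [if_neg (by simpa using hc)]
      rw [hA, hB]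
      refine ⟨by simp [hlen], ?_, by simpa using hcnt, ?_, ?_⟩
      · simpa using hst.trans (stModel_nopress s B0.1 hlen2).symm
      · rw [bulbK_snoc B0.1 s.length 0 (t+1) hlen2]
        rw [if_pos (by omega)]
        push_cast
        rw [h4b]
      · rw [show ((((t+1:Nat)):Int)) + 1 = (((t+2:Nat)):Int) by push_cast; ring]
        rw [bulbK_snoc B0.1 s.length 0 (t+2) hlen2]
        rw [bulbK_zero B0.1 s.length (t+2) (by omega)]
        simp
    · -- press
      have hA : stepA e A0 (((t+1:Nat)):Int) = (stModel s (B0.1 ++ [1]), A0.2 + 1) := by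
        unfold stepA
        rw [hsub]
        rw [if_neg (by rw [hcondA]; simpa using hc)]
        simp only [PySem.List.pySetD_natCast, PySem.List.pyGetD_natCast,
          show ((((t+1:Nat)):Int)) + 1 = (((t+2:Nat)):Int) by push_cast; ring]
        rw [hst]
        rw [show (t:Nat) = B0.1.length from hlen.symm]
        rw [stModel_press s B0.1 hlen2]
      have hB : stepB s e B0 (((t+1:Nat)):Int) = (B0.1 ++ [1], B0.2.2.1, 1, B0.2.2.2 + 1) := by
        unfold stepB
        rw [hsub, PySem.List.pyGetD_natCast s]
        rw [if_pos (by simpa using hc)]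
      rw [hA, hB]
      refine ⟨by simp [hlen], rfl, by simp [hcnt], ?_, ?_⟩
      · rw [bulbK_snoc B0.1 s.length 1 (t+1) hlen2]
        rw [if_pos (by omega)]
        push_cast
        rw [h4b]
      · rw [show ((((t+1:Nat)):Int)) + 1 = (((t+2:Nat)):Int) by push_cast; ring]
        rw [bulbK_snoc B0.1 s.length 1 (t+2) hlen2]
        rw [bulbK_zero B0.1 s.length (t+2) (by omega)]
        rw [if_pos (show t+2 ≤ B0.1.length + 2 ∧ B0.1.length ≤ t+2 from by omega)]

theorem dropLast_stModel (s : List Char) (ps : List Nat) :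
    (stModel s ps).dropLast =
      (List.range s.length).map
        (fun j => effChar ((s ++ ['0']).getD j ' ') (bulbK ps s.length (j : Int))) := by
  unfold stModel
  rw [List.range_succ, List.map_append]
  simp

theorem final_map_eq (s : List Char) (ps : List Nat) :
    (List.range s.length).map
      (fun j => effChar ((s ++ ['0']).getD j ' ') (bulbK ps s.length (j : Int))) =
    (List.range s.length).map
      (fun (j : Nat) => effChar (PySem.List.pyGetD s (j : Int) ' ') (bulbK ps s.length (j : Int))) := by
  apply List.map_congr_left
  intro j hj
  rw [List.mem_range] at hj
  rw [getD_snoc, if_pos hj, PySem.List.pyGetD_natCast]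

theorem main_eq (start end_ : String) (count : Int)
    (hpre : start.toList.length ≤ end_.toList.length + 1) :
    solution start end_ count = solution_alt start end_ count := by
  unfold solution solution_alt
  simp only [PySem.List.len_eq, PySem.List.slice_to_neg_one]
  rcases Nat.eq_zero_or_pos start.toList.length with hn | hn
  · rw [hn]
    rw [show ((0:Nat) : Int) = (0:Int) by norm_num]
    rw [PySem.List.pyRange_one_eq_nil (by omega)]
    simp only [List.foldl_nil]
    simp [List.eq_nil_of_length_eq_zero hn]
  · obtain ⟨hlen, hst, hcnt, -, -⟩ :=
      loop_inv start.toList end_.toList count (start.toList.length - 1) (by omega)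
    rw [show ((start.toList.length : Nat) : Int) = 1 + ((start.toList.length - 1 : Nat) : Int)
      by push_cast [hn]; ring]
    rw [hst, hcnt, dropLast_stModel, final_map_eq]

-- ===== VERDICT (by name: the statement is the Claim_ definition above) =====
theorem solution_spec : Claim_equal_solution := by
  intro start end_ count _ hpre
  unfold Spec_solution
  exact main_eq start end_ count hpre
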